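-- pv_equiv track=rewrite | github.com/I4-PJ/i4_llm_agent | i4_llm_agent/history.py | get_recent_turns
-- ===== SOURCE A (Python) =====
-- from typing import List, Dict, Optional, Any
--
-- DIALOGUE_ROLES = ["user", "assistant"] # Roles considered part of the conversation history
--
-- def get_recent_turns(
--     messages: List[Dict],
--     count: int,
--     roles: List[str] = DIALOGUE_ROLES, # Default to dialogue roles
--     exclude_last: bool = True
-- ) -> List[Dict]:
--     """
--     Extracts the most recent 'count' messages matching the specified roles.
--     Optionally excludes the very last message in the list.
--
--     Args:
--         messages: The list of message dictionaries.
--         count: The maximum number of messages to return.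
--         roles: A list of roles to include (defaults to 'user', 'assistant').
--         exclude_last: If True, the very last message in the original list is excluded
--                       before selecting the count.
--
--     Returns:
--         A list containing the selected recent messages, preserving order.
--     """
--     if count <= 0 or not messages:
--         return []
--
--     source_list = messages[:-1] if exclude_last and len(messages) > 0 else messages
--     # Filter messages based on the provided roles
--     filtered_messages = [
--         msg for msg in source_list if isinstance(msg, dict) and msg.get("role") in roles
--     ]
--
--     if not filtered_messages:
--         return []
--
--     # Slice the filtered list to get the most recent 'count'
--     start_index = max(0, len(filtered_messages) - count)
--     recent_history = filtered_messages[start_index:]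
--
--     return recent_history
-- ===== SOURCE B (Python) =====
-- from typing import List, Dict
--
-- DIALOGUE_ROLES = ["user", "assistant"]
--
-- def get_recent_turns(
--     messages: List[Dict],
--     count: int,
--     roles: List[str] = DIALOGUE_ROLES,
--     exclude_last: bool = True
-- ) -> List[Dict]:
--     """Backward scan with early stop instead of filter-whole-list-then-slice."""
--     if count <= 0 or not messages:
--         return []
--     source_list = messages[:-1] if exclude_last else messages
--     buf = []
--     for msg in reversed(source_list):
--         if isinstance(msg, dict) and msg.get("role") in roles:
--             buf.append(msg)
--             if len(buf) == count:
--                 break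
--     buf.reverse()
--     return buf
-- ===== Notes on version B (the rewrite author's own statement) =====
-- stated objective: alternative
-- what changed: Replaces the forward filter of the whole list followed by a tail slice with a single backward scan that accumulates matches and stops early once 'count' matches are collected, then reverses the buffer.
import Mathlib
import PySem

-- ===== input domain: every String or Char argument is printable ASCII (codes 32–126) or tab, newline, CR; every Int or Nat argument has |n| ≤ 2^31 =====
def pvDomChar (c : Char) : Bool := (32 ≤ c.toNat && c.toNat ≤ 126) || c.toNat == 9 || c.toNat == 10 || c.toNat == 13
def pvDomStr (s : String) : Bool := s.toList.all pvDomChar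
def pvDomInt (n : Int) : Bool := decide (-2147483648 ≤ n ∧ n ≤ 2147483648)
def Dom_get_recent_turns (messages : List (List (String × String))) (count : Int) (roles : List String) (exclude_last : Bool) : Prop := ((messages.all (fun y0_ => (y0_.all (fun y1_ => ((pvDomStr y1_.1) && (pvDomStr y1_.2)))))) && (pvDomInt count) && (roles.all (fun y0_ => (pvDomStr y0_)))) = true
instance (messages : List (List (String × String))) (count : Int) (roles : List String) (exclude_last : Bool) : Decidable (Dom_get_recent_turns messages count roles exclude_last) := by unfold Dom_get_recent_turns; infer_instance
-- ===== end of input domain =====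

-- B replaces "filter the whole list forward, then slice the tail" by a backward scan that
-- stops as soon as 'count' matches are collected (alternative decomposition, same return value).

-- ===== PORT A =====
-- msg.get("role") in roles : first-match association-list lookup, then membership
def pvRoleMatch (roles : List String) (msg : List (String × String)) : Bool :=
  match msg.find? (fun p => p.1 == "role") with
  | some p => roles.contains p.2
  | none => false

def get_recent_turns (messages : List (List (String × String))) (count : Int) (roles : List String) (exclude_last : Bool) : List (List (String × String)) :=
  if count ≤ 0 || messages.isEmpty then []
  else
    let source_list := if exclude_last && decide (0 < messages.length) then PySem.List.slice messages none (some (-1)) else messages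
    let filtered := source_list.filter (pvRoleMatch roles)
    if filtered.isEmpty then []
    else
      let start_index : Int := max 0 ((filtered.length : Int) - count)
      PySem.List.slice filtered (some start_index) none

-- ===== PORT B =====
-- buf.append on match; break when len(buf) == count; structural recursion over the reversed source
def pvBackScan (roles : List String) (need : Nat) : List (List (String × String)) → List (List (String × String)) → List (List (String × String))
  | [], buf => buf
  | msg :: rest, buf =>
    if pvRoleMatch roles msg then
      let buf' := buf ++ [msg]
      if buf'.length = need then buf' else pvBackScan roles need rest buf'
    else pvBackScan roles need rest buf

def get_recent_turns_alt (messages : List (List (String × String))) (count : Int) (roles : List String) (exclude_last : Bool) : List (List (String × String)) :=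
  if count ≤ 0 || messages.isEmpty then []
  else
    let source_list := if exclude_last then messages.dropLast else messages
    (pvBackScan roles count.toNat source_list.reverse []).reverse

-- ===== PRECONDITION & SPEC =====
def Spec_get_recent_turns (messages : List (List (String × String))) (count : Int) (roles : List String) (exclude_last : Bool) (out : List (List (String × String))) : Prop := out = get_recent_turns_alt messages count roles exclude_last
instance (messages : List (List (String × String))) (count : Int) (roles : List String) (exclude_last : Bool) (out : List (List (String × String))) : Decidable (Spec_get_recent_turns messages count roles exclude_last out) := by unfold Spec_get_recent_turns; infer_instance

-- ===== CLAIM (what is proved, stated in full; the proofs are below) =====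
def Claim_equal_get_recent_turns : Prop := ∀ (messages : List (List (String × String))) (count : Int) (roles : List String) (exclude_last : Bool), Dom_get_recent_turns messages count roles exclude_last → Spec_get_recent_turns messages count roles exclude_last (get_recent_turns messages count roles exclude_last)

-- ===== LEMMAS AND PROOFS =====
-- the backward scan collects exactly the first (need - |buf|) matches of the remaining list
theorem pvBackScan_eq (roles : List String) (need : Nat) (l buf : List (List (String × String)))
    (h : buf.length < need) :
    pvBackScan roles need l buf = buf ++ (l.filter (pvRoleMatch roles)).take (need - buf.length) := by
  induction l generalizing buf with
  | nil => simp [pvBackScan]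
  | cons m rest ih =>
    simp only [pvBackScan, List.filter_cons]
    by_cases hm : pvRoleMatch roles m
    · simp only [hm, if_true]
      by_cases hfull : (buf ++ [m]).length = need
      · simp only [hfull, if_true]
        have h1 : need - buf.length = 1 := by simp at hfull; omega
        simp [h1]
      · simp only [hfull, if_false]
        rw [ih (buf ++ [m]) (by simp at hfull ⊢; omega)]
        have h1 : need - buf.length = (need - (buf ++ [m]).length) + 1 := by simp at hfull ⊢; omega
        simp [h1]
    · simp [hm, ih buf h]

theorem get_recent_turns_spec : Claim_equal_get_recent_turns := by
  intro messages count roles exclude_last _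
  unfold Spec_get_recent_turns get_recent_turns get_recent_turns_alt
  by_cases hz : count ≤ 0 || messages.isEmpty
  · simp [hz]
  · simp only [hz]
    simp only [Bool.or_eq_true, decide_eq_true_eq, List.isEmpty_iff, not_or] at hz
    obtain ⟨hc, hne⟩ := hz
    have hlen : 0 < messages.length := List.length_pos_of_ne_nil hne
    have hsrc : (if exclude_last && decide (0 < messages.length) then PySem.List.slice messages none (some (-1)) else messages)
        = (if exclude_last then messages.dropLast else messages) := by
      cases exclude_last with
      | false => simp
      | true => simp [hlen, PySem.List.slice_to_neg_one]
    rw [hsrc]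
    set source := (if exclude_last then messages.dropLast else messages) with hsdef
    set f := source.filter (pvRoleMatch roles) with hf
    have hneed : 0 < count.toNat := by omega
    rw [pvBackScan_eq roles count.toNat source.reverse [] (by simpa using hneed)]
    simp only [List.nil_append, List.length_nil, Nat.sub_zero, List.filter_reverse, ← hf]
    rw [List.take_reverse, List.reverse_reverse]
    by_cases hemp : f.isEmpty
    · have hfe : f = [] := List.isEmpty_iff.mp hemp
      simp [hfe]
    · simp only [hemp]
      have hstart : max 0 ((f.length : Int) - count) = ((f.length - count.toNat : Nat) : Int) := by
        omega
      rw [hstart, PySem.List.slice_from_natCast]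
      simp
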